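-- pv_equiv track=rewrite | github.com/youtube/cobalt | components/cronet/gn2bp/gen_android_bp.py | _rebase_files
-- ===== SOURCE A (Python) =====
-- def _rebase_files(filepaths, parent_prefix):
--   """
--   Rebase a list of filepaths according to the provided path. This assumes
--   that the |filepaths| are subdirectories of the |parent|.
--   If the assumption is violated then None is returned.
--
--   Note: filepath can be references to other modules (eg: ":module"), those
--   are added as-is without any translation.
--
--   :param filepaths: Collection of strings representing filepaths.
--   :param parent_prefix: Path for which the srcs will be rebased relative to.
--   :returns The rebased filepaths or None.
--   """
--   if not parent_prefix:
--     return filepaths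
--
--   rebased_srcs = set()
--   for src in filepaths:
--     if src.startswith(":"):
--       # This is a reference to another Android.bp module, add as-is.
--       rebased_srcs.add(src)
--       continue
--
--     if not src.startswith(parent_prefix):
--       # This module depends on a source file that is not in its subpackage.
--       return None
--     # Remove the BUILD file path to make it relative.
--     rebased_srcs.add(src[len(parent_prefix) + 1:])
--   return rebased_srcs
-- ===== SOURCE B (Python) =====
-- def _rebase_files(filepaths, parent_prefix):
--   if not parent_prefix:
--     return filepaths
--   if any(not s.startswith(':') and not s.startswith(parent_prefix)
--          for s in filepaths):
--     return None
--   return {s if s.startswith(':') else s[len(parent_prefix) + 1:]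
--           for s in filepaths}
-- ===== Notes on version B (the rewrite author's own statement) =====
-- stated objective: idiomatic
-- what changed: Replaced the interleaved loop (validate + accumulate + early return) by a two-pass decomposition: an any() validation pass returning None, then one set comprehension building the result.
import Mathlib
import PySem

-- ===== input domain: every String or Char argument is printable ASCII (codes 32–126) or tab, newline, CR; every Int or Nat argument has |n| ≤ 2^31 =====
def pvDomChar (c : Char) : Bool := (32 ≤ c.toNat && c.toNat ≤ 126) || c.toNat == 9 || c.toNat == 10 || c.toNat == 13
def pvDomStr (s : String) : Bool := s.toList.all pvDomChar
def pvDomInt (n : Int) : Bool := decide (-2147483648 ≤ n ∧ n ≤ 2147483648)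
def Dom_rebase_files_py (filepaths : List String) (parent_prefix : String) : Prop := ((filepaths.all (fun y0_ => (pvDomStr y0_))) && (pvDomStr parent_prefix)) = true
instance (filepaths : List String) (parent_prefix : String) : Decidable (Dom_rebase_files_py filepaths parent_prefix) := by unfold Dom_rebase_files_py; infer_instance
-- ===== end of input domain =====

-- B replaces A's single interleaved loop (validate + accumulate + early return) by a
-- validate-all pass followed by one comprehension-style build pass (idiomatic; same cost).

-- ===== PORT A =====
-- the for-loop of A: state is the accumulated set; early 'return None' is the none branch
def rebaseGoA (pp : String) : List String → PySem.Set String → Option (List String)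
  | [], acc => some acc
  | s :: rest, acc =>
    if PySem.Str.startswith s ":" then
      rebaseGoA pp rest (PySem.Set.add acc s)
    else if PySem.Str.startswith s pp then
      rebaseGoA pp rest (PySem.Set.add acc (PySem.Str.slice s (some ((PySem.Str.len pp : Int) + 1)) none))
    else none

def rebase_files_py (filepaths : List String) (parent_prefix : String) : Option (List String) :=
  if parent_prefix = "" then some filepaths
  else rebaseGoA parent_prefix filepaths PySem.Set.empty

-- ===== PORT B =====
def rebase_files_py_alt (filepaths : List String) (parent_prefix : String) : Option (List String) :=
  if parent_prefix = "" then some filepaths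
  else if filepaths.any (fun s => !(PySem.Str.startswith s ":") && !(PySem.Str.startswith s parent_prefix)) then none
  else some (PySem.Set.ofList (filepaths.map (fun s =>
    if PySem.Str.startswith s ":" then s
    else PySem.Str.slice s (some ((PySem.Str.len parent_prefix : Int) + 1)) none)))

-- ===== PRECONDITION & SPEC =====
def Spec_rebase_files_py (filepaths : List String) (parent_prefix : String) (out : Option (List String)) : Prop := out = rebase_files_py_alt filepaths parent_prefix
instance (filepaths : List String) (parent_prefix : String) (out : Option (List String)) : Decidable (Spec_rebase_files_py filepaths parent_prefix out) := by unfold Spec_rebase_files_py; infer_instance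

-- ===== CLAIM (what is proved, stated in full; the proofs are below) =====
def Claim_equal_rebase_files_py : Prop := ∀ (filepaths : List String) (parent_prefix : String), Dom_rebase_files_py filepaths parent_prefix → Spec_rebase_files_py filepaths parent_prefix (rebase_files_py filepaths parent_prefix)

-- ===== LEMMAS AND PROOFS =====
theorem rebaseGoA_eq (pp : String) (fps : List String) (acc : PySem.Set String) :
    rebaseGoA pp fps acc =
      if fps.any (fun s => !(PySem.Str.startswith s ":") && !(PySem.Str.startswith s pp)) then none
      else some (fps.foldl (fun t s => PySem.Set.add t
        (if PySem.Str.startswith s ":" then s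
         else PySem.Str.slice s (some ((PySem.Str.len pp : Int) + 1)) none)) acc) := by
  induction fps generalizing acc with
  | nil => simp [rebaseGoA]
  | cons s rest ih =>
    by_cases h1 : PySem.Chars.startswith s.toList [':'] = true
    · simp [rebaseGoA, h1, ih]
    · simp only [Bool.not_eq_true] at h1
      by_cases h2 : PySem.Chars.startswith s.toList pp.toList = true
      · simp [rebaseGoA, h1, h2, ih]
      · simp only [Bool.not_eq_true] at h2
        simp [rebaseGoA, h1, h2]

-- ===== VERDICT (by name: the statement is the Claim_ definition above) =====
theorem rebase_files_py_spec : Claim_equal_rebase_files_py := by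
  intro fps pp _
  unfold Spec_rebase_files_py rebase_files_py rebase_files_py_alt
  by_cases hpp : pp = ""
  · simp [hpp]
  · simp only [hpp, ite_false, rebaseGoA_eq]
    split
    · rfl
    · rw [← PySem.Set.update_empty, PySem.Set.update_map_eq_foldl_add]
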